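-- pv_equiv track=rewrite | github.com/ggxc3/100mscript | io_utils.py | _has_tabular_followup
-- ===== SOURCE A (Python) =====
-- def _split_semicolon_columns(line):
--     """Rozdelí riadok podľa ';' a odstráni koncové prázdne položky."""
--     columns = line.rstrip("\r\n").split(";")
--     while columns and columns[-1] == "":
--         columns.pop()
--     return columns
--
-- def _has_tabular_followup(lines, start_index, expected_columns, min_columns=6):
--     """Overí, že po kandidátnom riadku nasledujú ďalšie riadky podobné tabuľke."""
--     seen_candidates = 0
--     tabular_rows = 0
--
--     for line in lines[start_index + 1:]:
--         if not line.strip():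
--             continue
--         seen_candidates += 1
--         cols_count = len(_split_semicolon_columns(line))
--         if cols_count >= max(min_columns, expected_columns - 1):
--             tabular_rows += 1
--             if tabular_rows >= 2:
--                 return True
--         if seen_candidates >= 25:
--             break
--
--     return False
-- ===== SOURCE B (Python) =====
-- def _has_tabular_followup(lines, start_index, expected_columns, min_columns=6):
--     """Recursive countdown search: each consumed candidate (non-blank followup
--     line) decrements a budget (25) and, when it has a non-empty field at column
--     >= threshold, the number of tabular rows still needed (2); succeed when
--     needed hits 0.  The per-line test uses an existence check on the split
--     fields instead of popping trailing empties and measuring the length."""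
--     threshold = max(min_columns, expected_columns - 1)
--     tail = lines[start_index + 1:]
--
--     def is_tabular(line):
--         parts = line.rstrip("\r\n").split(";")
--         return threshold <= 0 or any(p != "" for p in parts[threshold - 1:])
--
--     def search(i, budget, needed):
--         if needed == 0:
--             return True
--         while i < len(tail) and not tail[i].strip():
--             i += 1
--         if budget == 0 or i == len(tail):
--             return False
--         return search(i + 1, budget - 1, needed - is_tabular(tail[i]))
--
--     return search(0, 25, 2)
-- ===== Notes on version B (the rewrite author's own statement) =====
-- stated objective: alternative
-- what changed: Replaces A's two-counter early-return scan with a recursive countdown search (budget 25, needed 2 decremented to success) and replaces the split/pop-trailing-empties/length column test with an existence test for a non-empty field at or past the threshold column.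
import Mathlib
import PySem

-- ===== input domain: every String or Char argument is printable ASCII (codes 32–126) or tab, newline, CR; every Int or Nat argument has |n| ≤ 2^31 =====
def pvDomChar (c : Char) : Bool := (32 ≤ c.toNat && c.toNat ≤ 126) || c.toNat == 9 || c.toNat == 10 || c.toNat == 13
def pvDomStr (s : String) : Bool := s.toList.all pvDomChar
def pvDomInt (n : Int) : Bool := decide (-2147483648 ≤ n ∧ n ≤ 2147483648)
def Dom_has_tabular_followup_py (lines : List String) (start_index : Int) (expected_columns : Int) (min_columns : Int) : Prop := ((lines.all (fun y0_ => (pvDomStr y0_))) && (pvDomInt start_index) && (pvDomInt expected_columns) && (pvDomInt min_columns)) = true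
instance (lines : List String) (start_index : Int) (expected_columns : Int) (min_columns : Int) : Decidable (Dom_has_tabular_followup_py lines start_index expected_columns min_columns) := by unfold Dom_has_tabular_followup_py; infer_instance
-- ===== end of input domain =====

-- ===== PORT A =====
-- B is a recursive countdown search with an existence-based column test instead of
-- A's two-counter early-return loop with a pop-trailing-empties length test; same cost.

-- line.rstrip("\r\n"): hand port (PySem has no chars-argument rstrip); exact: drops exactly the trailing '\r'/'\n' characters.
def pvRstripCRLF (cs : List Char) : List Char :=
  ((cs.reverse.dropWhile (fun c => c == '\r' || c == '\n'))).reverse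

-- _split_semicolon_columns: rstrip("\r\n"), split on ';', then the while-pop loop removing
-- trailing empty entries (hand port of the pop loop as reverse/dropWhile/reverse; exact).
def pvSplitSemicolonColumns (line : String) : List (List Char) :=
  let columns := PySem.Chars.splitOn (pvRstripCRLF line.toList) [';']
  ((columns.reverse.dropWhile (fun c => c == ([] : List Char))).reverse)

-- A's loop: skip blanks, count candidates (cap 25) and tabular rows (early return at 2).
def pvLoopA (thr : Int) : List String → Nat → Nat → Bool
  | [], _, _ => false
  | l :: rest, seen, tab =>
    if PySem.Chars.strip l.toList = [] then pvLoopA thr rest seen tab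
    else
      let seen' := seen + 1
      if thr ≤ ((pvSplitSemicolonColumns l).length : Int) then
        let tab' := tab + 1
        if 2 ≤ tab' then true
        else if 25 ≤ seen' then false
        else pvLoopA thr rest seen' tab'
      else if 25 ≤ seen' then false
      else pvLoopA thr rest seen' tab

def has_tabular_followup_py (lines : List String) (start_index : Int) (expected_columns : Int) (min_columns : Int) : Bool :=
  pvLoopA (max min_columns (expected_columns - 1)) (PySem.List.slice lines (some (start_index + 1)) none) 0 0

-- ===== PORT B =====
-- is_tabular: threshold <= 0 or any(p != "" for p in line.rstrip("\r\n").split(";")[threshold-1:])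
def pvIsTabularB (thr : Int) (l : String) : Bool :=
  if thr ≤ 0 then true
  else (PySem.List.slice (PySem.Chars.splitOn (pvRstripCRLF l.toList) [';']) (some (thr - 1)) none).any
    (fun p => !(p == ([] : List Char)))

-- search(rest, budget, needed): needed==0 → True; budget==0 or empty → False; blank lines consume nothing.
def pvSearchB (thr : Int) : List String → Nat → Nat → Bool
  | _, _, 0 => true
  | [], _, _ + 1 => false
  | _ :: _, 0, _ + 1 => false
  | l :: rest, b + 1, n + 1 =>
    if PySem.Chars.strip l.toList = [] then pvSearchB thr rest (b + 1) (n + 1)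
    else pvSearchB thr rest b ((n + 1) - (if pvIsTabularB thr l then 1 else 0))

def has_tabular_followup_py_alt (lines : List String) (start_index : Int) (expected_columns : Int) (min_columns : Int) : Bool :=
  let threshold := max min_columns (expected_columns - 1)
  pvSearchB threshold (PySem.List.slice lines (some (start_index + 1)) none) 25 2

-- ===== PRECONDITION & SPEC =====
def Spec_has_tabular_followup_py (lines : List String) (start_index : Int) (expected_columns : Int) (min_columns : Int) (out : Bool) : Prop := out = has_tabular_followup_py_alt lines start_index expected_columns min_columns
instance (lines : List String) (start_index : Int) (expected_columns : Int) (min_columns : Int) (out : Bool) : Decidable (Spec_has_tabular_followup_py lines start_index expected_columns min_columns out) := by unfold Spec_has_tabular_followup_py; infer_instance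

-- ===== CLAIM =====
def Claim_equal_has_tabular_followup_py : Prop := ∀ (lines : List String) (start_index : Int) (expected_columns : Int) (min_columns : Int), Dom_has_tabular_followup_py lines start_index expected_columns min_columns → Spec_has_tabular_followup_py lines start_index expected_columns min_columns (has_tabular_followup_py lines start_index expected_columns min_columns)

-- ===== LEMMAS AND PROOFS =====
-- existence of a non-empty entry at index ≥ k  ↔  k < length after popping trailing empties
lemma drop_any_eq (parts : List (List Char)) :
    ∀ k : Nat, ((parts.drop k).any (fun p => !(p == ([] : List Char)))) =
      decide (k < ((parts.reverse.dropWhile (fun c => c == ([] : List Char))).reverse).length) := by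
  induction parts using List.reverseRecOn with
  | nil => intro k; simp
  | append_singleton l a ih =>
    intro k
    rw [List.drop_append, List.any_append, List.reverse_append, List.reverse_singleton,
      List.singleton_append]
    by_cases ha : a = []
    · subst ha
      rw [List.dropWhile_cons_of_pos (by simp)]
      have h1 : (([([] : List Char)] : List (List Char)).drop (k - l.length)).any
          (fun p => !(p == ([] : List Char))) = false := by
        rcases Nat.eq_zero_or_pos (k - l.length) with h | h
        · rw [h]; rfl
        · rw [List.drop_eq_nil_of_le (by simp; omega)]; rfl
      rw [h1, Bool.or_false, ih k]
    · rw [List.dropWhile_cons_of_neg (by simp [ha])]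
      by_cases hk : k ≤ l.length
      · have hdrop : k - l.length = 0 := by omega
        rw [hdrop]
        have h2 : (([a] : List (List Char)).drop 0).any (fun p => !(p == ([] : List Char))) = true := by
          simp [ha]
        rw [h2, Bool.or_true]
        simp
        omega
      · have hdrop : (([a] : List (List Char)).drop (k - l.length)) = [] := by
          apply List.drop_eq_nil_of_le; simp; omega
        have hdl : l.drop k = [] := List.drop_eq_nil_of_le (by omega)
        rw [hdrop, hdl]
        simp
        omega

lemma isTabularB_eq (thr : Int) (l : String) :
    pvIsTabularB thr l = decide (thr ≤ ((pvSplitSemicolonColumns l).length : Int)) := by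
  unfold pvIsTabularB pvSplitSemicolonColumns
  by_cases h : thr ≤ 0
  · simp [h]
    omega
  · have h1 : (0 : Int) ≤ thr - 1 := by omega
    rw [if_neg h, PySem.List.slice_from _ h1, drop_any_eq]
    have : ((thr - 1).toNat : Int) = thr - 1 := Int.toNat_of_nonneg h1
    simp only [decide_eq_decide]
    omega

lemma loopA_eq_searchB (thr : Int) (xs : List String) :
    ∀ (b n : Nat), 1 ≤ b → b ≤ 25 → 1 ≤ n → n ≤ 2 →
      pvLoopA thr xs (25 - b) (2 - n) = pvSearchB thr xs b n := by
  induction xs with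
  | nil =>
    intro b n hb _ hn _
    obtain ⟨b', rfl⟩ : ∃ b', b = b' + 1 := ⟨b - 1, by omega⟩
    obtain ⟨n', rfl⟩ : ∃ n', n = n' + 1 := ⟨n - 1, by omega⟩
    simp [pvLoopA, pvSearchB]
  | cons l rest ih =>
    intro b n hb hb25 hn hn2
    obtain ⟨b', rfl⟩ : ∃ b', b = b' + 1 := ⟨b - 1, by omega⟩
    obtain ⟨n', rfl⟩ : ∃ n', n = n' + 1 := ⟨n - 1, by omega⟩
    by_cases hblank : PySem.Chars.strip l.toList = []
    · rw [show pvSearchB thr (l :: rest) (b' + 1) (n' + 1) = pvSearchB thr rest (b' + 1) (n' + 1) from by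
        simp [pvSearchB, hblank]]
      rw [show pvLoopA thr (l :: rest) (25 - (b' + 1)) (2 - (n' + 1)) = pvLoopA thr rest (25 - (b' + 1)) (2 - (n' + 1)) from by
        simp [pvLoopA, hblank]]
      exact ih _ _ hb hb25 hn hn2
    · rw [show pvSearchB thr (l :: rest) (b' + 1) (n' + 1)
          = pvSearchB thr rest b' ((n' + 1) - (if pvIsTabularB thr l then 1 else 0)) from by
        simp [pvSearchB, hblank]]
      by_cases hg : thr ≤ ((pvSplitSemicolonColumns l).length : Int)
      · have htab : pvIsTabularB thr l = true := by rw [isTabularB_eq]; simp [hg]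
        rw [htab]
        rcases Nat.eq_zero_or_pos n' with hn0 | hn1
        · subst hn0
          have h2 : 2 ≤ (2 - 1) + 1 := by omega
          simp [pvLoopA, hblank, hg, pvSearchB]
        · have hn'1 : n' = 1 := by omega
          subst hn'1
          have htab' : (2 - (1 + 1)) + 1 = 1 := by omega
          rcases Nat.eq_zero_or_pos b' with hb0 | hb1
          · subst hb0
            have hseen : (25 : Nat) ≤ (25 - (0 + 1)) + 1 := by omega
            cases rest <;> simp [pvLoopA, hblank, hg, pvSearchB]
          · have h25 : 24 - b' + 1 = 25 - b' := by omega
            have key := ih b' 1 hb1 (by omega) (by omega) (by omega)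
            simp [pvLoopA, hblank, hg, h25, show ¬ ((25:Nat) ≤ 25 - b') from by omega] at key ⊢
            exact key
      · have htab : pvIsTabularB thr l = false := by rw [isTabularB_eq]; simp [hg]
        rw [htab]
        rcases Nat.eq_zero_or_pos b' with hb0 | hb1
        · subst hb0
          have hseen : (25 : Nat) ≤ (25 - (0 + 1)) + 1 := by omega
          cases rest <;> simp [pvLoopA, hblank, hg, pvSearchB]
        · have h25 : 24 - b' + 1 = 25 - b' := by omega
          have key := ih b' (n' + 1) hb1 (by omega) hn hn2
          simp [pvLoopA, hblank, hg, h25, show ¬ ((25:Nat) ≤ 25 - b') from by omega] at key ⊢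
          exact key

-- ===== VERDICT =====
theorem has_tabular_followup_py_spec : Claim_equal_has_tabular_followup_py := by
  intro lines start_index expected_columns min_columns _
  unfold Spec_has_tabular_followup_py has_tabular_followup_py has_tabular_followup_py_alt
  simpa using loopA_eq_searchB (max min_columns (expected_columns - 1))
    (PySem.List.slice lines (some (start_index + 1)) none) 25 2 (by omega) (by omega) (by omega) (by omega)
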